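-- pv_equiv track=rewrite | github.com/hanukathas/CodingRevisions | cses/DP/two_sets_2.py | two_sets_2
-- ===== SOURCE A (Python) =====
-- def two_sets_2(n: int) -> int:
--     # If n*(n+1)/2 is odd, it's impossible to divide into equal sums
--     total = n * (n + 1) // 2
--     if total % 2 != 0:
--         return 0
--
--     # Target sum for each subset
--     target = total // 2
--     MOD = 1_000_000_007
--
--     # dp[i][j] represents number of ways to make sum j using numbers from 1 to i
--     dp = [[0] * (target + 1) for _ in range(n + 1)]
--
--     # Base case: empty set can make sum 0
--     dp[0][0] = 1
--
--     # For each number from 1 to n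
--     for i in range(1, n + 1):
--         # For each possible sum from 0 to target
--         for j in range(target + 1):
--             # Don't take number i
--             dp[i][j] = dp[i - 1][j]
--
--             # Take number i if possible (sum - i >= 0)
--             if j >= i:
--                 dp[i][j] = (dp[i][j] + dp[i - 1][j - i]) % MOD
--
--     # Return result (divide by 2 as each valid division is counted twice)
--     return (dp[n][target] * pow(2, MOD - 2, MOD)) % MOD
-- ===== SOURCE B (Python) =====
-- def two_sets_2(n: int) -> int:
--     # The whole coefficient array of prod_{k<=i} (1+x^k) lives in ONE arbitrary-
--     # precision integer, one coefficient per 96-bit digit; multiplying by (1 + x^k)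
--     # is a single whole-integer shift-add (C speed).  Digits are renormalized
--     # mod MOD every 60 steps (they at most double per step, so they stay below
--     # 2**90 < 2**96 and never carry); renormalization and the final read only
--     # keep the digits for degrees 0..target, higher ones are ignored.
--     total = n * (n + 1) // 2
--     if total % 2 != 0:
--         return 0
--     target = total // 2
--     MOD = 1_000_000_007
--     NB = 12       # bytes per digit
--     SHIFT = 96    # bits per digit
--     L = target + 1
--
--     def unpack(v):
--         raw = v.to_bytes((v.bit_length() + 7) // 8, "little")
--         return [int.from_bytes(raw[i * NB:(i + 1) * NB], "little") % MOD
--                 for i in range(L)]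
--
--     def pack(ds):
--         return int.from_bytes(b"".join(d.to_bytes(NB, "little") for d in ds), "little")
--
--     v = 1  # the polynomial 1
--     for k in range(1, n + 1):
--         v += v << (SHIFT * k)
--         if k % 60 == 0:
--             v = pack(unpack(v))
--
--     return (unpack(v)[target] * pow(2, MOD - 2, MOD)) % MOD
-- ===== Notes on version B (the rewrite author's own statement) =====
-- stated objective: alternative
-- what changed: Replaces A's (n+1)x(target+1) per-cell DP table with a single arbitrary-precision integer holding the whole coefficient array of prod(1+x^k) in 96-bit digits: each step is one whole-integer shift-add executed by CPython's bignum arithmetic instead of an inner Python loop over all sums, with digits renormalized mod 1e9+7 only every 60 steps.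
import Mathlib
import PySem

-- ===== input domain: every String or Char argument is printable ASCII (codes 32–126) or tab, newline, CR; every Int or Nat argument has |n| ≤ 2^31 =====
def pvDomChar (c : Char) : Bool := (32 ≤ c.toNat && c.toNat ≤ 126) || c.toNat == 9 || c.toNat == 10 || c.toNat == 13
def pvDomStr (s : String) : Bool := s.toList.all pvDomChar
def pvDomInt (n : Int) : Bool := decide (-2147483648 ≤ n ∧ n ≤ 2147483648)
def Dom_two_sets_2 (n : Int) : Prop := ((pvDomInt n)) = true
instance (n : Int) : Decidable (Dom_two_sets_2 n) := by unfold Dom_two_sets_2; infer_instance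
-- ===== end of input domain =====

-- B keeps the whole coefficient array of prod (1+x^k) in ONE big integer (one
-- coefficient per 96-bit digit): each step is a single whole-integer shift-add and
-- digits are renormalized mod 1e9+7 every 60 steps, instead of A's per-cell 2-D DP
-- table. Return values proved equal on Pre_.

-- shared helper: port of Python's builtin three-argument pow(b, e, m) by binary exponentiation
def pvPowMod (b e m : Nat) : Nat :=
  if h : e = 0 then 1 % m
  else
    let r := pvPowMod b (e / 2) m
    if e % 2 = 0 then r * r % m else r * r % m * (b % m) % m
termination_by e
decreasing_by exact Nat.div_lt_self (Nat.pos_of_ne_zero h) (by norm_num)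

-- ===== PORT A =====
-- A preallocates dp as (n+1) rows of zeros and overwrites row i left to right before it is
-- read; the port transcribes the table as a list of rows appended in turn, each row built by
-- the inner j-loop appending the value that A assigns into dp[i][j].
def two_sets_2 (n : Int) : Int :=
  let total := PySem.Int.floordiv (n * (n + 1)) 2
  if PySem.Int.mod total 2 ≠ 0 then 0
  else
    let target := PySem.Int.floordiv total 2
    let MOD : Int := 1000000007
    -- dp = [[0]*(target+1) for _ in range(n+1)]; dp[0][0] = 1; Python lists are O(1)-indexed
    -- arrays, so rows are Arrays; row i is fully written left to right before it is read, so
    -- it is transcribed as the values the inner loop assigns into dp[i][j], pushed in turn.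
    -- Every index Python's run reaches here is nonnegative (loop variables come from
    -- nonnegative ranges and the j-i read is guarded by j >= i), so .toNat is exact.
    let dp0 : Array Int := (Array.replicate (target + 1).toNat 0).setIfInBounds 0 1
    let dp : Array (Array Int) :=
      (PySem.List.pyRange 1 (n + 1) 1).foldl
        (fun dp i =>
          let prev := dp.getD (i - 1).toNat #[]                -- dp[i-1]
          let row :=
            (PySem.List.pyRange 0 (target + 1) 1).foldl
              (fun row j =>
                let v := prev.getD j.toNat 0                   -- dp[i][j] = dp[i-1][j]
                let v := if j ≥ i
                  then PySem.Int.mod (v + prev.getD (j - i).toNat 0) MOD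
                  else v
                row.push v)
              #[]
          dp.push row)
        #[dp0]
    -- pow(2, MOD-2, MOD) with MOD-2 = 1000000005
    PySem.Int.mod ((dp.getD n.toNat #[]).getD target.toNat 0 *
      ((pvPowMod 2 1000000005 1000000007 : Nat) : Int)) 1000000007

-- ===== PORT B =====
-- transliteration of Source B: the DP state is ONE integer v = sum of digit_i * 2^(96 i);
-- 'v += v << 96k' is 'v + v*2^(96k)'; 'v.to_bytes(bytelen(v), little)' sliced in 12-byte
-- chunks (missing high chunks read as 0) yields the base-2^96 digits
-- 'v / 2^(96 i) % 2^96' (exact: v ≥ 0), and the little-endian join in pack is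
-- exactly 'foldr (fun d acc => d + acc * 2^96) 0'.
def two_sets_2_alt (n : Int) : Int :=
  let total := PySem.Int.floordiv (n * (n + 1)) 2
  if PySem.Int.mod total 2 ≠ 0 then 0
  else
    let target := PySem.Int.floordiv total 2
    let MOD : Int := 1000000007
    let unpack : Int → List Int := fun v =>
      (PySem.List.pyRange 0 (target + 1) 1).map
        (fun i => PySem.Int.mod
          (PySem.Int.mod (PySem.Int.floordiv v ((2 : Int) ^ (96 * i).toNat)) ((2 : Int) ^ 96))
          MOD)
    let pack : List Int → Int := fun ds => ds.foldr (fun d acc => d + acc * (2 : Int) ^ 96) 0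
    let v : Int :=
      (PySem.List.pyRange 1 (n + 1) 1).foldl
        (fun v k =>
          let v := v + v * (2 : Int) ^ (96 * k).toNat
          if PySem.Int.mod k 60 = 0 then pack (unpack v) else v)
        1
    PySem.Int.mod ((unpack v).getD target.toNat 0 *
      ((pvPowMod 2 1000000005 1000000007 : Nat) : Int)) 1000000007

-- ===== PRECONDITION & SPEC =====
-- Pre_ excludes exactly the inputs on which A raises IndexError: n < 0 with n*(n+1)//2 even
-- (there dp = [] and dp[0][0] = 1 fails); A returns normally on every other input.
def Pre_two_sets_2 (n : Int) : Prop :=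
  0 ≤ n ∨ PySem.Int.mod (PySem.Int.floordiv (n * (n + 1)) 2) 2 ≠ 0
instance (n : Int) : Decidable (Pre_two_sets_2 n) := by unfold Pre_two_sets_2; infer_instance
def pvWitness_two_sets_2 : Int := 7

def Spec_two_sets_2 (n : Int) (out : Int) : Prop := out = two_sets_2_alt n
instance (n : Int) (out : Int) : Decidable (Spec_two_sets_2 n out) := by unfold Spec_two_sets_2; infer_instance

-- ===== CLAIM (what is proved, stated in full; the proofs are below) =====
def Claim_equal_two_sets_2 : Prop := ∀ (n : Int), Dom_two_sets_2 n → Pre_two_sets_2 n → Spec_two_sets_2 n (two_sets_2 n)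

-- ===== LEMMAS AND PROOFS =====

-- ---- shared DP model: row i is the coefficient list of prod_{k<=i}(1+x^k) mod x^(t+1) ----

def pvEntry (i : Int) (r : List Int) (j : Nat) : Int :=
  if i ≤ (j : Int)
  then PySem.Int.mod (r.getD j 0 + PySem.List.pyGetD r ((j : Int) - i) 0) 1000000007
  else r.getD j 0

def pvNewRow (i : Int) (r : List Int) : List Int :=
  (List.range r.length).map (pvEntry i r)

def pvIter (t : Int) : Nat → List Int
  | 0 => 1 :: List.replicate t.toNat 0
  | k + 1 => pvNewRow ((k : Int) + 1) (pvIter t k)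

theorem pvIter_length (t : Int) (k : Nat) : (pvIter t k).length = t.toNat + 1 := by
  induction k with
  | zero => simp [pvIter]
  | succ k ih => simp [pvIter, pvNewRow, ih]

-- ---- A-side: the 2-D table fold builds exactly the rows pvIter ----

theorem pvA_inner (i : Int) (r : List Int) (t : Int) (ht : t + 1 = (r.length : Int)) :
    (PySem.List.pyRange 0 (t + 1) 1).foldl
      (fun row j =>
        let v := PySem.List.pyGetD r j 0
        let v := if j ≥ i
          then PySem.Int.mod (v + PySem.List.pyGetD r (j - i) 0) 1000000007
          else v
        row ++ [v])
      [] = pvNewRow i r := by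
  rw [ht, PySem.List.pyRange_zero_natCast]
  rw [PySem.List.foldl_append_singleton_eq_map
    (f := fun j => if j ≥ i then PySem.Int.mod (PySem.List.pyGetD r j 0 + PySem.List.pyGetD r (j - i) 0) 1000000007 else PySem.List.pyGetD r j 0)]
  rw [List.map_map, pvNewRow]
  refine List.map_congr_left ?_
  intro j hj
  simp [pvEntry, PySem.List.pyGetD_natCast, ge_iff_le]

def pvAstep (t : Int) (dp : List (List Int)) (i : Int) : List (List Int) :=
  let prev := PySem.List.pyGetD dp (i - 1) []
  let row :=
    (PySem.List.pyRange 0 (t + 1) 1).foldl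
      (fun row j =>
        let v := PySem.List.pyGetD prev j 0
        let v := if j ≥ i
          then PySem.Int.mod (v + PySem.List.pyGetD prev (j - i) 0) 1000000007
          else v
        row ++ [v])
      []
  dp ++ [row]

theorem pvA_outer (t : Int) (ht : 0 ≤ t) (m : Nat) :
    ((PySem.List.pyRange 1 ((m : Int) + 1) 1).foldl (pvAstep t)
      [PySem.List.pySetD (List.replicate (t + 1).toNat 0) 0 1]).length = m + 1 ∧
    ((PySem.List.pyRange 1 ((m : Int) + 1) 1).foldl (pvAstep t)
      [PySem.List.pySetD (List.replicate (t + 1).toNat 0) 0 1]).getD m [] = pvIter t m := by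
  induction m with
  | zero =>
      rw [show ((0 : Nat) : Int) + 1 = 1 from by norm_num, PySem.List.pyRange_one_eq_nil le_rfl]
      refine ⟨rfl, ?_⟩
      simp only [List.foldl_nil, List.getD_cons_zero]
      rw [PySem.List.pySetD_of_nonneg (h := le_refl 0),
        show (t + 1).toNat = t.toNat + 1 from by omega]
      rfl
  | succ m ih =>
      rw [show (((m + 1 : Nat)) : Int) + 1 = ((m : Int) + 1) + 1 from by push_cast; ring,
        PySem.List.pyRange_one_succ_right (a := 1) (b := (m : Int) + 1) (by omega),
        List.foldl_append, List.foldl_cons, List.foldl_nil]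
      have hlen := ih.1
      have hget := ih.2
      rw [pvAstep]
      have hprev : PySem.List.pyGetD
          ((PySem.List.pyRange 1 ((m : Int) + 1) 1).foldl (pvAstep t)
            [PySem.List.pySetD (List.replicate (t + 1).toNat 0) 0 1]) (((m : Int) + 1) - 1) []
          = pvIter t m := by
        rw [show ((m : Int) + 1) - 1 = ((m : Nat) : Int) from by ring,
          PySem.List.pyGetD_natCast, hget]
      rw [hprev]
      have hrow := pvA_inner ((m : Int) + 1) (pvIter t m) t
        (by rw [pvIter_length]; push_cast; omega)
      rw [hrow]
      constructor
      · simp [hlen]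
      · rw [List.getD_eq_getElem _ _ (by simp [hlen])]
        rw [List.getElem_append_right (by omega)]
        simp [hlen, pvIter]

-- bridge: the Array folds of port A project (via toList) onto the List-level folds above

theorem pvFoldlSim {σ τ β : Type} (conv : σ → τ) (f : σ → β → σ) (g : τ → β → τ)
    (P : β → Prop) (l : List β) (hl : ∀ x ∈ l, P x)
    (h : ∀ a x, P x → conv (f a x) = g (conv a) x) (a : σ) :
    conv (l.foldl f a) = l.foldl g (conv a) := by
  induction l generalizing a with
  | nil => rfl
  | cons x xs ih =>
      rw [List.foldl_cons, List.foldl_cons, ← h a x (hl x (by simp))]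
      exact ih (fun y hy => hl y (by simp [hy])) (f a x)

theorem pvArrGetD {α : Type} (a : Array α) (n : Nat) (d : α) :
    a.getD n d = a.toList.getD n d := by
  by_cases h : n < a.size
  · rw [Array.getD, dif_pos h, List.getD_eq_getElem _ _ (by simpa using h)]
    exact (Array.getElem_toList h).symm
  · rw [Array.getD, dif_neg h, List.getD_eq_default _ _ (by simpa using h)]

theorem pvArrGetI (a : Array Int) (j : Int) (hj : 0 ≤ j) (d : Int) :
    a.getD j.toNat d = PySem.List.pyGetD a.toList j d := by
  rw [pvArrGetD, PySem.List.pyGetD_of_nonneg _ _ hj]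

theorem pvA_inner_sim (i t : Int) (p : Array Int) :
    ((PySem.List.pyRange 0 (t + 1) 1).foldl
      (fun row j =>
        let v := p.getD j.toNat 0
        let v := if j ≥ i
          then PySem.Int.mod (v + p.getD (j - i).toNat 0) 1000000007
          else v
        row.push v)
      #[]).toList
    = (PySem.List.pyRange 0 (t + 1) 1).foldl
      (fun row j =>
        let v := PySem.List.pyGetD p.toList j 0
        let v := if j ≥ i
          then PySem.Int.mod (v + PySem.List.pyGetD p.toList (j - i) 0) 1000000007
          else v
        row ++ [v])
      [] := by
  refine pvFoldlSim Array.toList _ _ (fun j => 0 ≤ j) _ ?_ ?_ #[]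
  · intro j hj
    have := (PySem.List.mem_pyRange_one).1 hj
    omega
  · intro b j hj
    show (b.push _).toList = b.toList ++ [_]
    rw [Array.toList_push]
    by_cases hij : j ≥ i
    · simp only [if_pos hij]
      rw [pvArrGetI p j hj, pvArrGetI p (j - i) (by omega)]
    · simp only [if_neg hij]
      rw [pvArrGetI p j hj]

theorem pvA_final (t : Int) (ht : 0 ≤ t) (m : Nat) :
    ((((PySem.List.pyRange 1 ((m : Int) + 1) 1).foldl
      (fun dp i =>
        let prev := dp.getD (i - 1).toNat #[]
        let row :=
          (PySem.List.pyRange 0 (t + 1) 1).foldl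
            (fun row j =>
              let v := prev.getD j.toNat 0
              let v := if j ≥ i
                then PySem.Int.mod (v + prev.getD (j - i).toNat 0) 1000000007
                else v
              row.push v)
            #[]
        dp.push row)
      #[(Array.replicate (t + 1).toNat 0).setIfInBounds 0 1]).getD m #[]).getD t.toNat 0)
    = (pvIter t m).getD t.toNat 0 := by
  have hsim :
      (((PySem.List.pyRange 1 ((m : Int) + 1) 1).foldl
        (fun dp i =>
          let prev := dp.getD (i - 1).toNat #[]
          let row :=
            (PySem.List.pyRange 0 (t + 1) 1).foldl
              (fun row j =>
                let v := prev.getD j.toNat 0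
                let v := if j ≥ i
                  then PySem.Int.mod (v + prev.getD (j - i).toNat 0) 1000000007
                  else v
                row.push v)
              #[]
          dp.push row)
        #[(Array.replicate (t + 1).toNat 0).setIfInBounds 0 1]).toList.map Array.toList)
      = (PySem.List.pyRange 1 ((m : Int) + 1) 1).foldl (pvAstep t)
          [PySem.List.pySetD (List.replicate (t + 1).toNat 0) 0 1] := by
    have hinit : (#[(Array.replicate (t + 1).toNat 0).setIfInBounds 0 1] :
        Array (Array Int)).toList.map Array.toList
        = [PySem.List.pySetD (List.replicate (t + 1).toNat 0) 0 1] := by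
      rw [PySem.List.pySetD_of_nonneg (List.replicate (t + 1).toNat 0) 1 (le_refl (0 : Int))]
      simp [Array.toList_setIfInBounds, Array.toList_replicate]
    rw [← hinit]
    refine pvFoldlSim (fun (d : Array (Array Int)) => d.toList.map Array.toList) _ _
      (fun i => 1 ≤ i) _ ?_ ?_ _
    · intro i hi
      exact ((PySem.List.mem_pyRange_one).1 hi).1
    · intro d i hi
      show (d.push _).toList.map Array.toList = pvAstep t (d.toList.map Array.toList) i
      rw [Array.toList_push, List.map_append, pvAstep]
      have hprev : (d.getD (i - 1).toNat #[]).toList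
          = PySem.List.pyGetD (d.toList.map Array.toList) (i - 1) [] := by
        rw [PySem.List.pyGetD_of_nonneg _ _ (by omega), pvArrGetD]
        exact (List.getD_map d.toList #[] Array.toList).symm
      simp only [List.map_cons, List.map_nil]
      rw [pvA_inner_sim i t (d.getD (i - 1).toNat #[]), hprev]
  have hrow : (((PySem.List.pyRange 1 ((m : Int) + 1) 1).foldl
      (fun dp i =>
        let prev := dp.getD (i - 1).toNat #[]
        let row :=
          (PySem.List.pyRange 0 (t + 1) 1).foldl
            (fun row j =>
              let v := prev.getD j.toNat 0
              let v := if j ≥ i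
                then PySem.Int.mod (v + prev.getD (j - i).toNat 0) 1000000007
                else v
              row.push v)
            #[]
        dp.push row)
      #[(Array.replicate (t + 1).toNat 0).setIfInBounds 0 1]).getD m #[]).toList
      = pvIter t m := by
    rw [pvArrGetD]
    have hm := List.getD_map (f := Array.toList)
      ((PySem.List.pyRange 1 ((m : Int) + 1) 1).foldl
        (fun dp i =>
          let prev := dp.getD (i - 1).toNat #[]
          let row :=
            (PySem.List.pyRange 0 (t + 1) 1).foldl
              (fun row j =>
                let v := prev.getD j.toNat 0
                let v := if j ≥ i
                  then PySem.Int.mod (v + prev.getD (j - i).toNat 0) 1000000007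
                  else v
                row.push v)
              #[]
          dp.push row)
        #[(Array.replicate (t + 1).toNat 0).setIfInBounds 0 1]).toList
      (#[] : Array Int) (n := m)
    rw [show (#[] : Array Int).toList = ([] : List Int) from rfl] at hm
    rw [← hm, hsim]
    exact (pvA_outer t ht m).2
  rw [pvArrGetD _ t.toNat 0, hrow]

def pvBB : Int := (2 : Int) ^ 96

def pvPackF (f : Nat → Int) (m : Nat) : Int := ∑ i ∈ Finset.range m, f i * pvBB ^ i

theorem pvBB_pos : 0 < pvBB := by norm_num [pvBB]

theorem pvPackF_bounds (f : Nat → Int) (m : Nat)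
    (h : ∀ i < m, 0 ≤ f i ∧ f i < pvBB) :
    0 ≤ pvPackF f m ∧ pvPackF f m < pvBB ^ m := by
  induction m with
  | zero => simp [pvPackF]
  | succ m ih =>
      have hm := ih (fun i hi => h i (by omega))
      have hfm := h m (by omega)
      have hp : (0:Int) < pvBB ^ m := pow_pos pvBB_pos m
      rw [pvPackF, Finset.sum_range_succ]
      constructor
      · have := mul_nonneg hfm.1 hp.le
        have := hm.1
        rw [pvPackF] at this
        omega
      · have h1 : f m * pvBB ^ m ≤ (pvBB - 1) * pvBB ^ m := by
          apply mul_le_mul_of_nonneg_right (by omega) hp.le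
        have h2 : pvPackF f m < pvBB ^ m := hm.2
        rw [pvPackF] at h2
        have : pvBB ^ (m + 1) = pvBB * pvBB ^ m := by ring
        nlinarith

theorem pvPackF_split (f : Nat → Int) (j m : Nat) (hjm : j ≤ m) :
    pvPackF f m = pvPackF f j + pvBB ^ j * ∑ i ∈ Finset.range (m - j), f (j + i) * pvBB ^ i := by
  rw [pvPackF, pvPackF, Finset.range_eq_Ico,
    ← Finset.sum_Ico_consecutive (fun i => f i * pvBB ^ i) (Nat.zero_le j) hjm,
    Finset.sum_Ico_eq_sum_range (fun i => f i * pvBB ^ i) j m, ← Finset.range_eq_Ico,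
    Finset.mul_sum]
  congr 1
  refine Finset.sum_congr rfl ?_
  intro i _
  rw [pow_add]
  ring

theorem pvPackF_digit (f : Nat → Int) (m : Nat)
    (h : ∀ i < m, 0 ≤ f i ∧ f i < pvBB) (j : Nat) :
    pvPackF f m / pvBB ^ j % pvBB = if j < m then f j else 0 := by
  by_cases hjm : j < m
  · rw [if_pos hjm]
    have hsplit := pvPackF_split f j m (by omega)
    have hlow := pvPackF_bounds f j (fun i hi => h i (by omega))
    set high := ∑ i ∈ Finset.range (m - j), f (j + i) * pvBB ^ i with hhigh
    have hhead : high = f j + pvBB * ∑ i ∈ Finset.range (m - j - 1), f (j + 1 + i) * pvBB ^ i := by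
      rw [hhigh, show m - j = (m - j - 1) + 1 from by omega, Finset.sum_range_succ']
      have h1 : ∀ i ∈ Finset.range (m - j - 1),
          f (j + (i + 1)) * pvBB ^ (i + 1) = pvBB * (f (j + 1 + i) * pvBB ^ i) := by
        intro i _
        rw [show j + (i + 1) = j + 1 + i from by omega]
        ring
      rw [Finset.sum_congr rfl h1, ← Finset.mul_sum, Nat.add_zero, pow_zero, mul_one, add_comm]
      norm_num
    have hdiv : pvPackF f m / pvBB ^ j = high := by
      rw [hsplit, mul_comm (pvBB ^ j) high,
        Int.add_mul_ediv_right _ _ (pow_ne_zero j (by norm_num [pvBB] : (pvBB:Int) ≠ 0)),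
        Int.ediv_eq_zero_of_lt hlow.1 hlow.2, zero_add]
    rw [hdiv, hhead, Int.add_mul_emod_self_left]
    exact Int.emod_eq_of_lt (h j hjm).1 (h j hjm).2
  · rw [if_neg hjm]
    have hb := pvPackF_bounds f m h
    have : pvPackF f m < pvBB ^ j :=
      lt_of_lt_of_le hb.2 (pow_le_pow_right₀ (by norm_num [pvBB]) (by omega))
    rw [Int.ediv_eq_zero_of_lt hb.1 this, Int.zero_emod]

theorem pvPackF_congr (f g : Nat → Int) (m : Nat) (h : ∀ i < m, f i = g i) :
    pvPackF f m = pvPackF g m := by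
  refine Finset.sum_congr rfl ?_
  intro i hi
  rw [h i (Finset.mem_range.1 hi)]

theorem pvShiftAddFull (f : Nat → Int) (m s : Nat) :
    pvPackF f m + pvPackF f m * pvBB ^ s
      = pvPackF (fun i => (if i < m then f i else 0) + if s ≤ i then f (i - s) else 0) (m + s) := by
  have hpad : pvPackF (fun i => if i < m then f i else 0) (m + s) = pvPackF f m := by
    rw [pvPackF_split (fun i => if i < m then f i else 0) m (m + s) (by omega)]
    have hz : ∑ i ∈ Finset.range (m + s - m), (if m + i < m then f (m + i) else 0) * pvBB ^ i
        = 0 := by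
      refine Finset.sum_eq_zero ?_
      intro i _
      rw [if_neg (by omega), zero_mul]
    rw [hz, mul_zero, add_zero]
    exact pvPackF_congr _ _ m (fun i hi => by rw [if_pos hi])
  have hshift : pvPackF (fun i => if s ≤ i then f (i - s) else 0) (m + s)
      = pvPackF f m * pvBB ^ s := by
    rw [pvPackF_split (fun i => if s ≤ i then f (i - s) else 0) s (m + s) (by omega)]
    have hz : pvPackF (fun i => if s ≤ i then f (i - s) else 0) s = 0 := by
      refine Finset.sum_eq_zero ?_
      intro i hi
      have hir := Finset.mem_range.1 hi
      simp only
      rw [if_neg (by omega), zero_mul]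
    have hh : ∑ i ∈ Finset.range (m + s - s), (if s ≤ s + i then f (s + i - s) else 0) * pvBB ^ i
        = pvPackF f m := by
      rw [show m + s - s = m from by omega]
      refine Finset.sum_congr rfl ?_
      intro i _
      rw [if_pos (by omega), show s + i - s = i from by omega]
    rw [hz, hh, zero_add, mul_comm]
  rw [← hshift, ← hpad, pvPackF, pvPackF, pvPackF, ← Finset.sum_add_distrib]
  refine Finset.sum_congr rfl ?_
  intro i _
  ring

-- ---- list/bridge lemmas ----

theorem pvFoldrPack (ds : List Int) :
    ds.foldr (fun d acc => d + acc * (2 : Int) ^ 96) 0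
      = pvPackF (fun i => ds.getD i 0) ds.length := by
  induction ds with
  | nil => simp [pvPackF]
  | cons d ds ih =>
      rw [List.foldr_cons, ih, List.length_cons, pvPackF, pvPackF, Finset.sum_range_succ',
        show (2 : Int) ^ 96 = pvBB from rfl, Finset.sum_mul]
      simp only [List.getD_cons_zero, List.getD_cons_succ, pow_zero, mul_one]
      rw [add_comm]
      congr 1
      exact Finset.sum_congr rfl (fun i _ => by ring)

theorem pvNewRow_getD (a : Int) (r : List Int) (i : Nat) (hi : i < r.length) :
    (pvNewRow a r).getD i 0 = pvEntry a r i := by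
  rw [pvNewRow, List.getD_eq_getElem _ _ (by simpa using hi)]
  simp

theorem pvIter_zero_getD (t : Int) (i : Nat) :
    (pvIter t 0).getD i 0 = if i = 0 then 1 else 0 := by
  cases i with
  | zero => simp [pvIter]
  | succ i =>
      simp only [pvIter, List.getD_cons_succ, if_neg (Nat.succ_ne_zero i)]
      by_cases h : i < t.toNat
      · rw [List.getD_eq_getElem _ _ (by simpa using h)]
        simp
      · rw [List.getD_eq_default _ _ (by simpa using h)]

-- ---- B-side: 96-bit digit bounds ----

theorem pvDigitBound : (1000000007 : Int) * 2 ^ 59 * 2 ≤ pvBB := by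
  norm_num [pvBB]

theorem pvModCast (k : Nat) : PySem.Int.mod ((k : Nat) : Int) 60 = (((k % 60 : Nat)) : Int) := by
  rw [PySem.Int.mod_eq_emod_of_pos (by norm_num)]
  exact_mod_cast (Int.natCast_mod k 60).symm

-- the loop invariant for B's fold: v packs (base 2^96) digits that reduce mod 1e9+7
-- to DP row k and stay below 1e9+7 * 2^(k % 60)
def pvInvB (t : Int) (k : Nat) (v : Int) : Prop :=
  ∃ (m : Nat) (f : Nat → Int), t.toNat + 1 ≤ m ∧ v = pvPackF f m ∧
    (∀ i < m, 0 ≤ f i ∧ f i < 1000000007 * 2 ^ (k % 60)) ∧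
    (∀ i < t.toNat + 1, f i % 1000000007 = (pvIter t k).getD i 0)

theorem pvB_init (t : Int) : pvInvB t 0 1 := by
  refine ⟨t.toNat + 1, fun i => if i = 0 then 1 else 0, le_rfl, ?_, ?_, ?_⟩
  · rw [pvPackF, Finset.sum_eq_single 0]
    · simp
    · intro i _ hi0
      rw [if_neg hi0, zero_mul]
    · intro h0
      exact absurd (Finset.mem_range.2 (by omega)) h0
  · intro i _
    by_cases h0 : i = 0 <;> simp [h0]
  · intro i hi
    rw [pvIter_zero_getD t i]
    by_cases h0 : i = 0 <;> simp [h0]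

theorem pvUnpackB_spec (t : Int) (ht : 0 ≤ t) (v : Int) (f : Nat → Int) (m : Nat)
    (hv : v = pvPackF f m)
    (hb : ∀ i < m, 0 ≤ f i ∧ f i < pvBB) (i : Nat) (hi : i < t.toNat + 1) (him : i < m) :
    ((PySem.List.pyRange 0 (t + 1) 1).map
      (fun i => PySem.Int.mod
        (PySem.Int.mod (PySem.Int.floordiv v ((2 : Int) ^ (96 * i).toNat)) ((2 : Int) ^ 96))
        1000000007)).getD i 0 = f i % 1000000007 := by
  rw [show t + 1 = (((t.toNat + 1 : Nat)) : Int) from by omega, PySem.List.pyRange_zero_natCast,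
    List.map_map]
  rw [List.getD_eq_getElem _ _ (by simpa using hi)]
  simp only [List.getElem_map, List.getElem_range, Function.comp_apply]
  have hcast : ((96 : Int) * ((i : Nat) : Int)).toNat = 96 * i := by
    rw [show (96 : Int) * ((i : Nat) : Int) = (((96 * i : Nat)) : Int) from by push_cast; ring,
      Int.toNat_natCast]
  rw [hcast, pow_mul, show ((2 : Int) ^ 96) = pvBB from rfl,
    PySem.Int.floordiv_eq_ediv_of_pos (pow_pos pvBB_pos i),
    PySem.Int.mod_eq_emod_of_pos (show (0:Int) < pvBB from pvBB_pos),
    PySem.Int.mod_eq_emod_of_pos (by norm_num : (0:Int) < 1000000007),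
    hv, pvPackF_digit f m hb i, if_pos him]

theorem pvB_step (t : Int) (ht : 0 ≤ t) (k : Nat) (v : Int) (h : pvInvB t k v) :
    pvInvB t (k + 1)
      (if PySem.Int.mod (((k : Nat) : Int) + 1) 60 = 0
       then ((PySem.List.pyRange 0 (t + 1) 1).map
              (fun i => PySem.Int.mod
                (PySem.Int.mod (PySem.Int.floordiv
                  (v + v * (2 : Int) ^ (96 * (((k : Nat) : Int) + 1)).toNat)
                  ((2 : Int) ^ (96 * i).toNat)) ((2 : Int) ^ 96))
                1000000007)).foldr (fun d acc => d + acc * (2 : Int) ^ 96) 0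
       else v + v * (2 : Int) ^ (96 * (((k : Nat) : Int) + 1)).toNat) := by
  obtain ⟨m, f, hmL, hv, hbnd, hcong⟩ := h
  have hM : (0:Int) < 1000000007 := by norm_num
  have hq : k % 60 < 60 := Nat.mod_lt _ (by norm_num)
  have hpow : ((2:Int)) ^ (k % 60) ≤ 2 ^ 59 := pow_le_pow_right₀ (by norm_num) (by omega)
  have h3 : (1000000007:Int) * 2 ^ (k % 60) ≤ 1000000007 * 2 ^ 59 :=
    mul_le_mul_of_nonneg_left hpow (by norm_num)
  have hexp : ((96:Int) * (((k:Nat):Int) + 1)).toNat = 96 * (k+1) := by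
    rw [show (96:Int) * (((k:Nat):Int)+1) = (((96*(k+1) : Nat)):Int) from by push_cast; ring,
      Int.toNat_natCast]
  set e : Nat → Int := fun i => (if i < m then f i else 0) + if k+1 ≤ i then f (i - (k+1)) else 0
    with he
  have hw : v + v * (2:Int) ^ ((96:Int) * (((k:Nat):Int) + 1)).toNat
      = pvPackF e (m + (k+1)) := by
    rw [hexp, pow_mul, show ((2:Int)^96) = pvBB from rfl, hv]
    exact pvShiftAddFull f m (k+1)
  have he_b : ∀ i < m + (k+1), 0 ≤ e i ∧ e i < 1000000007 * 2 ^ (k % 60) * 2 := by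
    intro i hi
    rw [he]
    by_cases h1 : i < m <;> by_cases hc : k + 1 ≤ i
    · obtain ⟨h0, hlt⟩ := hbnd i h1
      obtain ⟨h0', hlt'⟩ := hbnd (i - (k+1)) (by omega)
      simp only [if_pos h1, if_pos hc]
      constructor <;> linarith
    · obtain ⟨h0, hlt⟩ := hbnd i h1
      simp only [if_pos h1, if_neg hc]
      constructor <;> linarith
    · obtain ⟨h0', hlt'⟩ := hbnd (i - (k+1)) (by omega)
      simp only [if_neg h1, if_pos hc]
      constructor <;> linarith
    · simp only [if_neg h1, if_neg hc]
      have : (0:Int) < 1000000007 * 2 ^ (k % 60) * 2 := by positivity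
      constructor <;> linarith
  have he_BB : ∀ i < m + (k+1), 0 ≤ e i ∧ e i < pvBB := by
    intro i hi
    obtain ⟨h0, h1⟩ := he_b i hi
    have := pvDigitBound
    exact ⟨h0, by linarith⟩
  have he_cong : ∀ i < t.toNat + 1, e i % 1000000007 = (pvIter t (k+1)).getD i 0 := by
    intro i hi
    have hlen : i < (pvIter t k).length := by rw [pvIter_length]; omega
    rw [show pvIter t (k+1) = pvNewRow (((k:Nat):Int)+1) (pvIter t k) from rfl,
      pvNewRow_getD _ _ i hlen, pvEntry]
    by_cases hc : k + 1 ≤ i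
    · rw [if_pos (by exact_mod_cast hc : (((k:Nat):Int)+1) ≤ ((i:Nat):Int))]
      rw [PySem.Int.mod_eq_emod_of_pos hM,
        show ((i:Nat):Int) - (((k:Nat):Int)+1) = (((i - (k+1) : Nat)):Int) from by omega,
        PySem.List.pyGetD_natCast,
        ← hcong i hi, ← hcong (i-(k+1)) (by omega)]
      rw [he]
      simp only [if_pos hc, if_pos (show i < m from by omega)]
      rw [Int.add_emod]
    · rw [if_neg (by exact_mod_cast hc : ¬ (((k:Nat):Int)+1) ≤ ((i:Nat):Int))]
      rw [← hcong i hi, he]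
      simp only [if_neg hc, add_zero, if_pos (show i < m from by omega)]
  have hmz : PySem.Int.mod ((((k+1) : Nat)):Int) 60 = ((((k+1) % 60 : Nat)):Int) := pvModCast (k+1)
  rw [show (((k:Nat):Int) + 1) = ((((k+1) : Nat)):Int) from by omega] at hw ⊢
  rw [hw, hmz]
  by_cases hrem : (k+1) % 60 = 0
  · rw [if_pos (by exact_mod_cast hrem)]
    rw [pvFoldrPack]
    have hlen : ((PySem.List.pyRange 0 (t + 1) 1).map
        (fun i => PySem.Int.mod
          (PySem.Int.mod (PySem.Int.floordiv (pvPackF e (m + (k+1))) ((2 : Int) ^ (96 * i).toNat))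
            ((2 : Int) ^ 96)) 1000000007)).length = t.toNat + 1 := by
      rw [List.length_map, PySem.List.length_pyRange_one]
      omega
    rw [hlen]
    refine ⟨t.toNat + 1, _, le_rfl, rfl, ?_, ?_⟩
    · intro i hi
      have hu := pvUnpackB_spec t ht (pvPackF e (m + (k+1))) e (m + (k+1)) rfl he_BB i hi
        (by omega)
      rw [hu]
      refine ⟨Int.emod_nonneg _ (by norm_num), ?_⟩
      rw [hrem, pow_zero, mul_one]
      exact Int.emod_lt_of_pos _ hM
    · intro i hi
      have hu := pvUnpackB_spec t ht (pvPackF e (m + (k+1))) e (m + (k+1)) rfl he_BB i hi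
        (by omega)
      rw [hu, Int.emod_emod_of_dvd _ dvd_rfl]
      exact he_cong i hi
  · rw [if_neg (by exact_mod_cast hrem)]
    refine ⟨m + (k+1), e, by omega, rfl, ?_, he_cong⟩
    intro i hi
    obtain ⟨h0, h1⟩ := he_b i hi
    refine ⟨h0, ?_⟩
    rw [show (k+1) % 60 = k % 60 + 1 from by omega, pow_succ, ← mul_assoc]
    exact h1

theorem pvB_outer (t : Int) (ht : 0 ≤ t) (m : Nat) :
    pvInvB t m
      ((PySem.List.pyRange 1 ((m : Int) + 1) 1).foldl
        (fun v k =>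
          let v := v + v * (2 : Int) ^ (96 * k).toNat
          if PySem.Int.mod k 60 = 0
          then ((PySem.List.pyRange 0 (t + 1) 1).map
                 (fun i => PySem.Int.mod
                   (PySem.Int.mod (PySem.Int.floordiv v ((2 : Int) ^ (96 * i).toNat))
                     ((2 : Int) ^ 96)) 1000000007)).foldr
                 (fun d acc => d + acc * (2 : Int) ^ 96) 0
          else v)
        1) := by
  induction m with
  | zero =>
      rw [show ((0 : Nat) : Int) + 1 = 1 from by norm_num, PySem.List.pyRange_one_eq_nil le_rfl,
        List.foldl_nil]
      exact pvB_init t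
  | succ m ih =>
      rw [show (((m + 1 : Nat)) : Int) + 1 = ((m : Int) + 1) + 1 from by push_cast; ring,
        PySem.List.pyRange_one_succ_right (a := 1) (b := (m : Int) + 1) (by omega),
        List.foldl_append, List.foldl_cons, List.foldl_nil]
      exact pvB_step t ht m _ ih

theorem pvB_final (t : Int) (ht : 0 ≤ t) (m : Nat) :
    ((PySem.List.pyRange 0 (t + 1) 1).map
      (fun i => PySem.Int.mod
        (PySem.Int.mod (PySem.Int.floordiv
          ((PySem.List.pyRange 1 ((m : Int) + 1) 1).foldl
            (fun v k =>
              let v := v + v * (2 : Int) ^ (96 * k).toNat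
              if PySem.Int.mod k 60 = 0
              then ((PySem.List.pyRange 0 (t + 1) 1).map
                     (fun i => PySem.Int.mod
                       (PySem.Int.mod (PySem.Int.floordiv v ((2 : Int) ^ (96 * i).toNat))
                         ((2 : Int) ^ 96)) 1000000007)).foldr
                     (fun d acc => d + acc * (2 : Int) ^ 96) 0
              else v)
            1)
          ((2 : Int) ^ (96 * i).toNat)) ((2 : Int) ^ 96)) 1000000007)).getD t.toNat 0
    = (pvIter t m).getD t.toNat 0 := by
  obtain ⟨mm, f, hmL, hv, hbnd, hcong⟩ := pvB_outer t ht m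
  have hq : m % 60 < 60 := Nat.mod_lt _ (by norm_num)
  have hpow : ((2:Int)) ^ (m % 60) ≤ 2 ^ 59 := pow_le_pow_right₀ (by norm_num) (by omega)
  have h3 : (1000000007:Int) * 2 ^ (m % 60) ≤ 1000000007 * 2 ^ 59 :=
    mul_le_mul_of_nonneg_left hpow (by norm_num)
  have hb : ∀ i < mm, 0 ≤ f i ∧ f i < pvBB := by
    intro i hi
    obtain ⟨h0, h1⟩ := hbnd i hi
    have := pvDigitBound
    exact ⟨h0, by linarith⟩
  rw [pvUnpackB_spec t ht _ f mm hv hb t.toNat (by omega) (by omega)]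
  exact hcong t.toNat (by omega)

-- ===== VERDICT (by name: the statement is the Claim_ definition above) =====
theorem two_sets_2_spec : Claim_equal_two_sets_2 := by
  intro n hdom hpre
  simp only [Spec_two_sets_2, two_sets_2, two_sets_2_alt]
  split_ifs with hodd
  · rfl
  · have hn : 0 ≤ n := by
      rcases hpre with h | h
      · exact h
      · exact absurd h (by simpa using hodd)
    have htot : 0 ≤ PySem.Int.floordiv (n * (n + 1)) 2 := by
      have h1 : 0 ≤ n * (n + 1) := by positivity
      simpa [PySem.Int.floordiv] using Int.fdiv_nonneg h1 (by norm_num)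
    have ht : 0 ≤ PySem.Int.floordiv (PySem.Int.floordiv (n * (n + 1)) 2) 2 := by
      simpa [PySem.Int.floordiv] using Int.fdiv_nonneg htot (by norm_num)
    rw [show n = ((n.toNat : Nat) : Int) from (Int.toNat_of_nonneg hn).symm]
    set t := PySem.Int.floordiv (PySem.Int.floordiv (((n.toNat : Nat) : Int) * (((n.toNat : Nat) : Int) + 1)) 2) 2 with hT
    have ht' : 0 ≤ t := by
      rw [hT, Int.toNat_of_nonneg hn]
      exact ht
    rw [show (((n.toNat : Nat) : Int)).toNat = n.toNat from Int.toNat_natCast n.toNat]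
    rw [pvA_final t ht' n.toNat, pvB_final t ht' n.toNat]
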